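-- pv_equiv track=rewrite | github.com/Neon-Rainbow/SUDA | Python/往年考题/python考试/2021-1/2021-1.py | fun7
-- ===== SOURCE A (Python) =====
-- def fun7(lst):
--     lst1 = []
--     lst2 = []  # lst1存放奇数，lst2存放偶数
--     for i in lst:
--         if i % 2 == 1:
--             lst1.append(i)
--         else:
--             lst2.append(i)
--     lst1.sort(reverse=False)
--     lst2.sort(reverse=True)
--     return lst1 + lst2
-- ===== SOURCE B (Python) =====
-- def fun7(lst):
--     return sorted(lst, key=lambda i: (i % 2 == 0, -i if i % 2 == 0 else i))
-- ===== Notes on version B (the rewrite author's own statement) =====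
-- stated objective: idiomatic
-- what changed: Replaced the explicit partition loop plus two separate sorts with a single sorted() call using a lexicographic key (parity, signed value) that puts odds first ascending and evens after descending.
import Mathlib
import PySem

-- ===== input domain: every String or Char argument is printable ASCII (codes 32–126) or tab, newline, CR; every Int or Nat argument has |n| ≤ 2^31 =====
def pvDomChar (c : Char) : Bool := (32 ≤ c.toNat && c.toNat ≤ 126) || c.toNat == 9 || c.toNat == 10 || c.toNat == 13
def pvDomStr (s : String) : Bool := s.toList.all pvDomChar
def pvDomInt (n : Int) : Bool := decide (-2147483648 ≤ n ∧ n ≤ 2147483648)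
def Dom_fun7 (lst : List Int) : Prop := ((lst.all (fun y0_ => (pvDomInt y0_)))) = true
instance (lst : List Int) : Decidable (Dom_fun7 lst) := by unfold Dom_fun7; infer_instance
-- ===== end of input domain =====

-- B replaces A's partition-into-two-lists-then-two-sorts with one sorted() call on a
-- lexicographic (parity, signed value) key; equivalence of return values is proved below.

-- ===== PORT A =====
-- partition loop: lst1 collects i with i % 2 == 1 (appended), lst2 the rest
def fun7 (lst : List Int) : List Int :=
  let p := lst.foldl
    (fun (acc : List Int × List Int) i =>
      if PySem.Int.mod i 2 = 1 then (acc.1 ++ [i], acc.2) else (acc.1, acc.2 ++ [i]))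
    ([], [])
  PySem.List.sorted p.1 (fun x => x) false ++ PySem.List.sorted p.2 (fun x => x) true

-- ===== PORT B =====
-- Python key: (i % 2 == 0, -i if i % 2 == 0 else i); the bool is ported as 0/1 (False < True)
def pvK1 (i : Int) : Int := if PySem.Int.mod i 2 = 0 then 1 else 0
def pvK2 (i : Int) : Int := if PySem.Int.mod i 2 = 0 then -i else i
def fun7_alt (lst : List Int) : List Int := PySem.List.sorted2 lst pvK1 pvK2 false

-- ===== PRECONDITION & SPEC =====
def Spec_fun7 (lst : List Int) (out : List Int) : Prop := out = fun7_alt lst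
instance (lst : List Int) (out : List Int) : Decidable (Spec_fun7 lst out) := by unfold Spec_fun7; infer_instance

-- ===== CLAIM (what is proved, stated in full; the proofs are below) =====
def Claim_equal_fun7 : Prop := ∀ (lst : List Int), Dom_fun7 lst → Spec_fun7 lst (fun7 lst)

-- ===== LEMMAS AND PROOFS =====

-- the combined lexicographic key
def pvKey (i : Int) : Lex (Int × Int) := toLex (pvK1 i, pvK2 i)

lemma pvKey_inj : Function.Injective pvKey := by
  intro a b h
  simp only [pvKey, toLex_inj, Prod.mk.injEq, pvK1, pvK2] at h
  rcases PySem.Int.mod_two_eq a with ha | ha <;>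
    rcases PySem.Int.mod_two_eq b with hb | hb <;>
    simp at h <;> omega

lemma pvK1_odd {a : Int} (h : PySem.Int.mod a 2 = 1) : pvK1 a = 0 := by
  rw [pvK1, if_neg (by rw [h]; exact one_ne_zero)]

lemma pvK1_even {a : Int} (h : PySem.Int.mod a 2 = 0) : pvK1 a = 1 := by
  rw [pvK1, if_pos h]

lemma pvK2_odd {a : Int} (h : PySem.Int.mod a 2 = 1) : pvK2 a = a := by
  rw [pvK2, if_neg (by rw [h]; exact one_ne_zero)]

lemma pvK2_even {a : Int} (h : PySem.Int.mod a 2 = 0) : pvK2 a = -a := by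
  rw [pvK2, if_pos h]

-- B's sorted2 is sorting by the single lexicographic key pvKey
lemma alt_eq_sorted_key (lst : List Int) :
    fun7_alt lst = PySem.List.sorted lst pvKey false := by
  have h : (fun a b => decide (pvK1 a < pvK1 b) ||
        (!decide (pvK1 b < pvK1 a) && decide (pvK2 a < pvK2 b)))
      = (fun a b => decide (pvKey a < pvKey b)) := by
    funext a b
    have hiff : (pvK1 a < pvK1 b ∨ ¬ (pvK1 b < pvK1 a) ∧ pvK2 a < pvK2 b)
        ↔ pvKey a < pvKey b := by
      rw [pvKey, pvKey, Prod.Lex.lt_iff]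
      simp only [ofLex_toLex]
      omega
    by_cases h1 : pvK1 a < pvK1 b <;> by_cases h2 : pvK1 b < pvK1 a <;>
      by_cases h3 : pvK2 a < pvK2 b <;> simp [← hiff, h1, h2, h3]
  rw [fun7_alt, PySem.List.sorted2, PySem.List.sorted_eq_foldl_insertBy]
  simp only [if_neg (by decide : ¬ (false = true))]
  rw [h]

def pvC (i : Int) : Bool := decide (PySem.Int.mod i 2 = 1)

lemma pv_foldl_part (lst : List Int) (a b : List Int) :
    lst.foldl
      (fun (acc : List Int × List Int) i =>
        if PySem.Int.mod i 2 = 1 then (acc.1 ++ [i], acc.2) else (acc.1, acc.2 ++ [i]))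
      (a, b)
    = (a ++ lst.filter pvC, b ++ lst.filter (fun i => !pvC i)) := by
  induction lst generalizing a b with
  | nil => simp
  | cons x t ih =>
    have hm : PySem.Int.mod x 2 = x % 2 := PySem.Int.mod_eq_emod_of_pos (by norm_num)
    by_cases hx : PySem.Int.mod x 2 = 1
    · rw [List.foldl_cons]
      show List.foldl _ (if PySem.Int.mod x 2 = 1 then (a ++ [x], b) else (a, b ++ [x])) t = _
      rw [if_pos hx, ih]
      rw [hm] at hx
      simp [pvC, hx, List.filter_cons]
    · rw [List.foldl_cons]
      show List.foldl _ (if PySem.Int.mod x 2 = 1 then (a ++ [x], b) else (a, b ++ [x])) t = _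
      rw [if_neg hx, ih]
      rw [hm] at hx
      simp [pvC, hx, List.filter_cons]

lemma pv_fun7_perm (lst : List Int) : lst.Perm (fun7 lst) := by
  unfold fun7
  rw [pv_foldl_part]
  simp only [List.nil_append]
  exact ((List.filter_append_perm pvC lst).symm.trans
    (((PySem.List.sorted_perm (lst.filter pvC) (fun x => x) false).symm).append
      ((PySem.List.sorted_perm (lst.filter (fun i => !pvC i)) (fun x => x) true).symm)))

lemma pv_fun7_pairwise (lst : List Int) :
    (fun7 lst).Pairwise (fun a b => pvKey a ≤ pvKey b) := by
  unfold fun7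
  rw [pv_foldl_part]
  simp only [List.nil_append]
  have hodd : ∀ x ∈ PySem.List.sorted (lst.filter pvC) (fun x => x) false,
      PySem.Int.mod x 2 = 1 := by
    intro x hx
    rw [PySem.List.mem_sorted] at hx
    have := List.of_mem_filter hx
    simpa [pvC] using this
  have heven : ∀ x ∈ PySem.List.sorted (lst.filter (fun i => !pvC i)) (fun x => x) true,
      PySem.Int.mod x 2 = 0 := by
    intro x hx
    rw [PySem.List.mem_sorted] at hx
    have := List.of_mem_filter hx
    rcases PySem.Int.mod_two_eq x with h | h
    · exact h
    · rw [pvC, h] at this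
      simp at this
  rw [List.pairwise_append]
  refine ⟨?_, ?_, ?_⟩
  · have hp := PySem.List.sorted_pairwise (lst.filter pvC) (fun x => x)
    refine hp.imp_of_mem ?_
    intro a b ha hb hab
    have ha1 := hodd a ha; have hb1 := hodd b hb
    have hab' : a ≤ b := hab
    rw [pvKey, pvKey, Prod.Lex.le_iff]
    simp only [ofLex_toLex, pvK1_odd ha1, pvK1_odd hb1, pvK2_odd ha1, pvK2_odd hb1]
    exact Or.inr ⟨trivial, hab'⟩
  · have hp := PySem.List.sorted_pairwise_rev (lst.filter (fun i => !pvC i)) (fun x => x)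
    refine hp.imp_of_mem ?_
    intro a b ha hb hab
    have ha0 := heven a ha; have hb0 := heven b hb
    have hab' : b ≤ a := hab
    rw [pvKey, pvKey, Prod.Lex.le_iff]
    simp only [ofLex_toLex, pvK1_even ha0, pvK1_even hb0, pvK2_even ha0, pvK2_even hb0]
    exact Or.inr ⟨trivial, by omega⟩
  · intro a ha b hb
    have ha1 := hodd a ha; have hb0 := heven b hb
    rw [pvKey, pvKey, Prod.Lex.le_iff]
    simp only [ofLex_toLex, pvK1_odd ha1, pvK1_even hb0]
    omega

-- ===== VERDICT (by name: the statement is the Claim_ definition above) =====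
theorem fun7_spec : Claim_equal_fun7 := by
  intro lst _
  unfold Spec_fun7
  rw [alt_eq_sorted_key,
      PySem.List.sorted_eq_sorted_of_perm lst (fun7 lst) pvKey pvKey_inj (pv_fun7_perm lst),
      PySem.List.sorted_eq_self_of_pairwise _ _ (pv_fun7_pairwise lst)]
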